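-- pv_equiv track=rewrite | github.com/JonathanGodar/linalgprojekt | matrisförb.py | tokenize_comment
-- ===== SOURCE A (Python) =====
-- def tokenize_comment(comment):
--     # Clean the text
--     comment_copy = []
--     curr_word = ''
--     for letter in comment:
--         if letter in ' ,.!?':
--             if curr_word != '':
--                 comment_copy.append(curr_word)
--                 curr_word = ''
--             if letter in ',.!?':
--                 comment_copy.append(letter)
--         else:
--             if letter.isalpha() or letter.isdigit():
--                 curr_word += letter.lower()
--     # Split the cleaned text into words
--     if curr_word != '':
--         comment_copy.append(curr_word)
--     return comment_copy
-- ===== SOURCE B (Python) =====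
-- def tokenize_comment(comment):
--     # One cleaning pass that pads punctuation with spaces, then let str.split()
--     # produce the tokens.
--     cleaned = ''.join(
--         ' ' + c + ' ' if c in ',.!?' else c.lower()
--         for c in comment
--         if c in ' ,.!?' or c.isalpha() or c.isdigit()
--     )
--     return cleaned.split()
-- ===== Notes on version B (the rewrite author's own statement) =====
-- stated objective: idiomatic
-- what changed: Replaces A's hand-rolled word accumulator (curr_word buffer flushed on each separator) by one cleaning comprehension that pads punctuation with spaces and a single str.split() call that produces the tokens.
import Mathlib
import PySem

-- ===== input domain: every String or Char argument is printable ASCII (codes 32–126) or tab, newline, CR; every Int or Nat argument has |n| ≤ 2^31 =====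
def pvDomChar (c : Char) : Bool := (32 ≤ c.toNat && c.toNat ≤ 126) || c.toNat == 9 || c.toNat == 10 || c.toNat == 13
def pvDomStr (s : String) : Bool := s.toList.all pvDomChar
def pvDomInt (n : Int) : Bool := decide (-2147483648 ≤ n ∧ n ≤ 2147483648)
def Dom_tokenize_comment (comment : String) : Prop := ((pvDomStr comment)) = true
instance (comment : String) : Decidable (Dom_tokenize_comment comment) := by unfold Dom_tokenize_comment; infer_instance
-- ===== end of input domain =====

-- B replaces A's hand-rolled curr_word accumulator by a cleaning pass that pads
-- punctuation with spaces followed by a single whitespace split (idiomatic; same cost).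

-- ===== PORT A =====
-- A's loop body: state = (comment_copy, curr_word); curr_word kept as List Char,
-- words materialised with String.mk when appended (exact for Python str concatenation).
def pvStepA (st : List String × List Char) (letter : Char) : List String × List Char :=
  if [' ', ',', '.', '!', '?'].contains letter then
    -- 'letter in " ,.!?"' : membership of one char
    let acc := if st.2 = [] then st.1 else st.1 ++ [String.mk st.2]
    let acc := if [',', '.', '!', '?'].contains letter then acc ++ [String.mk [letter]] else acc
    (acc, [])
  else
    if PySem.Chars.isalpha letter || PySem.Chars.isdigit letter then
      (st.1, st.2 ++ PySem.Chars.lower [letter])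
    else st

-- the trailing 'if curr_word != '': comment_copy.append(curr_word)'
def pvFinishA (st : List String × List Char) : List String :=
  if st.2 = [] then st.1 else st.1 ++ [String.mk st.2]

def tokenize_comment (comment : String) : List String :=
  pvFinishA (comment.toList.foldl pvStepA ([], []))

-- ===== PORT B =====
-- the generator expression: filter = its 'if' clause, flatMap = the yielded pieces
-- (''.join concatenates them); ''.join(...).split() = Chars.split₀ on the char list.
def tokenize_comment_alt (comment : String) : List String :=
  let cleaned :=
    ((comment.toList.filter
        (fun c => [' ', ',', '.', '!', '?'].contains c
                  || PySem.Chars.isalpha c || PySem.Chars.isdigit c)).flatMap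
      (fun c => if [',', '.', '!', '?'].contains c then [' ', c, ' ']
                else PySem.Chars.lower [c]))
  (PySem.Chars.split₀ cleaned).map String.mk

-- ===== PRECONDITION & SPEC =====
def Spec_tokenize_comment (comment : String) (out : List String) : Prop := out = tokenize_comment_alt comment
instance (comment : String) (out : List String) : Decidable (Spec_tokenize_comment comment out) := by unfold Spec_tokenize_comment; infer_instance

-- ===== CLAIM (what is proved, stated in full; the proofs are below) =====
def Claim_equal_tokenize_comment : Prop := ∀ (comment : String), Dom_tokenize_comment comment → Spec_tokenize_comment comment (tokenize_comment comment)

-- ===== LEMMAS AND PROOFS =====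

-- the per-character emission of B's cleaning pass, as one total function
def pvEmit (c : Char) : List Char :=
  if [',', '.', '!', '?'].contains c then [' ', c, ' ']
  else if [' ', ',', '.', '!', '?'].contains c
          || PySem.Chars.isalpha c || PySem.Chars.isdigit c then PySem.Chars.lower [c]
  else []

theorem pv_punct_keep (c : Char) (h : [',', '.', '!', '?'].contains c = true) :
    [' ', ',', '.', '!', '?'].contains c = true := by
  simp only [List.contains_eq_mem, List.mem_cons, List.not_mem_nil, or_false,
    decide_eq_true_eq] at h ⊢
  tauto

theorem pv_flatMap_filter {α β : Type} (p : α → Bool) (f : α → List β) (l : List α) :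
    (l.filter p).flatMap f = l.flatMap (fun c => if p c then f c else []) := by
  induction l with
  | nil => rfl
  | cons c l ih =>
    by_cases h : p c = true
    · simp [h, ih]
    · simp [h, ih]

theorem pvEmit_eq (c : Char) :
    (if ([' ', ',', '.', '!', '?'].contains c
          || PySem.Chars.isalpha c || PySem.Chars.isdigit c) then
        (if [',', '.', '!', '?'].contains c then [' ', c, ' '] else PySem.Chars.lower [c])
      else ([] : List Char)) = pvEmit c := by
  unfold pvEmit
  by_cases hp : [',', '.', '!', '?'].contains c = true
  · rw [if_pos hp, if_pos hp, if_pos (by rw [pv_punct_keep c hp]; rfl)]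
  · by_cases hk : ([' ', ',', '.', '!', '?'].contains c
        || PySem.Chars.isalpha c || PySem.Chars.isdigit c) = true
    · rw [if_pos hk, if_neg hp, if_neg hp, if_pos hk]
    · rw [if_neg hk, if_neg hp, if_neg hk]

theorem pvEmit_filter_flatMap (l : List Char) :
    ((l.filter (fun c => [' ', ',', '.', '!', '?'].contains c
        || PySem.Chars.isalpha c || PySem.Chars.isdigit c)).flatMap
      (fun c => if [',', '.', '!', '?'].contains c then [' ', c, ' ']
                else PySem.Chars.lower [c]))
    = l.flatMap pvEmit := by
  rw [pv_flatMap_filter]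
  congr 1
  funext c
  exact pvEmit_eq c

theorem pv_go_nil (cur : List Char) (acc : List (List Char)) :
    PySem.Chars.split₀.go [] cur acc
      = if cur.isEmpty then acc.reverse else (cur.reverse :: acc).reverse := by
  simp only [PySem.Chars.split₀.go]

theorem pv_go_cons (c : Char) (l : List Char) (cur : List Char) (acc : List (List Char)) :
    PySem.Chars.split₀.go (c :: l) cur acc
      = if PySem.Chars.isspace c then
          (if cur.isEmpty then PySem.Chars.split₀.go l [] acc
           else PySem.Chars.split₀.go l [] (cur.reverse :: acc))
        else PySem.Chars.split₀.go l (c :: cur) acc := by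
  simp only [PySem.Chars.split₀.go]

theorem pv_go_acc (l : List Char) (cur : List Char) (acc : List (List Char)) :
    PySem.Chars.split₀.go l cur acc = acc.reverse ++ PySem.Chars.split₀.go l cur [] := by
  induction l generalizing cur acc with
  | nil =>
    rw [pv_go_nil, pv_go_nil]
    by_cases h : cur.isEmpty <;> simp [h]
  | cons c l ih =>
    rw [pv_go_cons, pv_go_cons]
    by_cases hs : PySem.Chars.isspace c
    · by_cases he : cur.isEmpty
      · rw [if_pos hs, if_pos hs, if_pos he, if_pos he, ih [] acc]
      · rw [if_pos hs, if_pos hs, if_neg he, if_neg he,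
          ih [] (cur.reverse :: acc), ih [] [cur.reverse]]
        simp
    · rw [if_neg hs, if_neg hs, ih (c :: cur) acc]

-- scanning a space terminates the pending word (if any) and continues
theorem pv_go_space (l : List Char) (cur : List Char) :
    PySem.Chars.split₀.go (' ' :: l) cur []
      = (if cur = [] then [] else [cur.reverse]) ++ PySem.Chars.split₀.go l [] [] := by
  rw [pv_go_cons, if_pos (by decide)]
  by_cases h : cur = []
  · rw [if_pos (by simp [h]), if_pos h]
    simp
  · rw [if_neg (by simp [h]), if_neg h, pv_go_acc l [] [cur.reverse]]
    simp

-- scanning the padded block ' c ' yields the pending word (if any) and the token [c]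
theorem pv_go_punct (c : Char) (hcns : PySem.Chars.isspace c = false)
    (l : List Char) (cur : List Char) :
    PySem.Chars.split₀.go (' ' :: c :: ' ' :: l) cur []
      = (if cur = [] then [] else [cur.reverse]) ++ [[c]]
          ++ PySem.Chars.split₀.go l [] [] := by
  have h2 : PySem.Chars.split₀.go (c :: ' ' :: l) [] []
      = [c] :: PySem.Chars.split₀.go l [] [] := by
    rw [pv_go_cons, if_neg (by rw [hcns]; decide), pv_go_space]
    simp
  rw [pv_go_space, h2]
  simp

theorem pv_char_le_iff (a b : Char) : a ≤ b ↔ a.toNat ≤ b.toNat := by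
  simp only [Char.le_def, UInt32.le_iff_toNat_le, Char.toNat_val]

theorem pv_isspace_false (d : Char)
    (h : (97 ≤ d.toNat ∧ d.toNat ≤ 122) ∨ (48 ≤ d.toNat ∧ d.toNat ≤ 57)) :
    PySem.Chars.isspace d = false := by
  simp only [PySem.Chars.isspace, Bool.or_eq_false_iff, Bool.and_eq_false_iff,
    decide_eq_false_iff_not]
  omega

theorem pv_not_space_of_alnum (c : Char)
    (h : (PySem.Chars.isalpha c || PySem.Chars.isdigit c) = true) :
    PySem.Chars.isspace (PySem.Chars.lowerChar c) = false := by
  unfold PySem.Chars.lowerChar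
  by_cases hu : PySem.Chars.isupper c = true
  · rw [if_pos hu]
    simp only [PySem.Chars.isupper, Bool.and_eq_true, decide_eq_true_eq] at hu
    have h1 : 65 ≤ c.toNat := by
      have := (pv_char_le_iff 'A' c).mp hu.1
      rwa [show ('A').toNat = 65 from by decide] at this
    have h2 : c.toNat ≤ 90 := by
      have := (pv_char_le_iff c 'Z').mp hu.2
      rwa [show ('Z').toNat = 90 from by decide] at this
    have hof : (Char.ofNat (c.toNat + 32)).toNat = c.toNat + 32 := by
      rw [Char.toNat_ofNat, if_pos]
      exact Or.inl (by omega)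
    exact pv_isspace_false _ (by rw [hof]; left; omega)
  · rw [if_neg hu]
    apply pv_isspace_false
    have hU : PySem.Chars.isupper c = false := Bool.not_eq_true _ |>.mp hu
    have hLD : PySem.Chars.islower c = true ∨ PySem.Chars.isdigit c = true := by
      simp only [PySem.Chars.isalpha, hU, Bool.false_or, Bool.or_eq_true] at h
      exact h
    rcases hLD with hx | hx
    · left
      simp only [PySem.Chars.islower, Bool.and_eq_true, decide_eq_true_eq] at hx
      constructor
      · have := (pv_char_le_iff 'a' c).mp hx.1
        rwa [show ('a').toNat = 97 from by decide] at this
      · have := (pv_char_le_iff c 'z').mp hx.2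
        rwa [show ('z').toNat = 122 from by decide] at this
    · right
      simp only [PySem.Chars.isdigit, Bool.and_eq_true, decide_eq_true_eq] at hx
      constructor
      · have := (pv_char_le_iff '0' c).mp hx.1
        rwa [show ('0').toNat = 48 from by decide] at this
      · have := (pv_char_le_iff c '9').mp hx.2
        rwa [show ('9').toNat = 57 from by decide] at this

-- the main invariant: A's fold with pending word `curr` (all non-space) computes
-- the tokens the split₀ scanner produces on the padded cleaning of the rest.
theorem pv_main (l : List Char) (acc : List String) (curr : List Char)
    (hc : ∀ c ∈ curr, PySem.Chars.isspace c = false) :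
    pvFinishA (l.foldl pvStepA (acc, curr))
      = acc ++ (PySem.Chars.split₀.go (l.flatMap pvEmit) curr.reverse []).map String.mk := by
  induction l generalizing acc curr with
  | nil =>
    simp only [List.foldl_nil, List.flatMap_nil, pvFinishA]
    rw [pv_go_nil]
    by_cases h : curr = []
    · simp [h]
    · rw [if_neg h, if_neg (by simp [h])]
      simp
  | cons c l ih =>
    rw [List.foldl_cons, List.flatMap_cons]
    by_cases hsep : [' ', ',', '.', '!', '?'].contains c = true
    · by_cases hp : [',', '.', '!', '?'].contains c = true
      · -- punctuation: pvEmit c = [' ', c, ' ']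
        have hcns : PySem.Chars.isspace c = false := by
          rw [List.contains_eq_mem] at hp
          simp only [List.mem_cons, List.not_mem_nil, or_false, decide_eq_true_eq] at hp
          rcases hp with h | h | h | h <;> rw [h] <;> decide
        have hstep : pvStepA (acc, curr) c
            = ((if curr = [] then acc else acc ++ [String.mk curr]) ++ [String.mk [c]], []) := by
          simp only [pvStepA]
          rw [if_pos hsep, if_pos hp]
        rw [show pvEmit c = [' ', c, ' '] by unfold pvEmit; rw [if_pos hp]]
        rw [hstep, ih _ [] (by intro x hx; cases hx)]
        rw [show ([' ', c, ' '] ++ l.flatMap pvEmit)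
              = ' ' :: c :: ' ' :: l.flatMap pvEmit from rfl]
        rw [pv_go_punct c hcns]
        by_cases h : curr = [] <;> simp [h]
      · -- c = ' '
        have hcsp : c = ' ' := by
          rw [List.contains_eq_mem] at hsep
          simp only [List.mem_cons, List.not_mem_nil, or_false, decide_eq_true_eq] at hsep
          have hp' : ¬(c = ',' ∨ c = '.' ∨ c = '!' ∨ c = '?') := by
            intro hx
            apply hp
            rw [List.contains_eq_mem]
            simpa using hx
          tauto
        subst hcsp
        have hstep : pvStepA (acc, curr) ' '
            = ((if curr = [] then acc else acc ++ [String.mk curr]), []) := by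
          simp only [pvStepA]
          rw [if_pos hsep, if_neg (by decide)]
        rw [show pvEmit ' ' = [' '] by decide]
        rw [hstep, ih _ [] (by intro x hx; cases hx)]
        rw [show ([' '] ++ l.flatMap pvEmit) = ' ' :: l.flatMap pvEmit from rfl]
        rw [pv_go_space]
        by_cases h : curr = [] <;> simp [h]
    · have hp : [',', '.', '!', '?'].contains c = false := by
        cases h4 : [',', '.', '!', '?'].contains c with
        | false => rfl
        | true => exact absurd (pv_punct_keep c h4) (by simp only [hsep]; simp)
      by_cases ha : (PySem.Chars.isalpha c || PySem.Chars.isdigit c) = true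
      · -- kept letter/digit
        have hlc : PySem.Chars.isspace (PySem.Chars.lowerChar c) = false :=
          pv_not_space_of_alnum c ha
        have hk : ([' ', ',', '.', '!', '?'].contains c
            || PySem.Chars.isalpha c || PySem.Chars.isdigit c) = true := by
          simp only [Bool.or_eq_true] at ha ⊢
          tauto
        have hstep : pvStepA (acc, curr) c = (acc, curr ++ [PySem.Chars.lowerChar c]) := by
          simp only [pvStepA]
          rw [if_neg hsep, if_pos ha]
          rfl
        rw [show pvEmit c = [PySem.Chars.lowerChar c] by
          unfold pvEmit
          rw [if_neg (by rw [hp]; decide), if_pos hk]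
          rfl]
        rw [hstep, ih acc (curr ++ [PySem.Chars.lowerChar c]) ?side]
        case side =>
          intro x hx
          rcases List.mem_append.1 hx with hx | hx
          · exact hc x hx
          · simp only [List.mem_cons, List.not_mem_nil, or_false] at hx
            subst hx; exact hlc
        rw [show ([PySem.Chars.lowerChar c] ++ l.flatMap pvEmit)
              = PySem.Chars.lowerChar c :: l.flatMap pvEmit from rfl]
        rw [pv_go_cons, if_neg (by rw [hlc]; decide)]
        simp
      · -- dropped char: pvEmit c = []
        have hk : ([' ', ',', '.', '!', '?'].contains c
            || PySem.Chars.isalpha c || PySem.Chars.isdigit c) = false := by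
          have hs : [' ', ',', '.', '!', '?'].contains c = false :=
            Bool.not_eq_true _ |>.mp hsep
          have ha' : (PySem.Chars.isalpha c || PySem.Chars.isdigit c) = false :=
            Bool.not_eq_true _ |>.mp ha
          rw [Bool.or_assoc, hs, ha']
          rfl
        have hstep : pvStepA (acc, curr) c = (acc, curr) := by
          simp only [pvStepA]
          rw [if_neg hsep, if_neg ha]
        rw [show pvEmit c = [] by
          unfold pvEmit
          rw [if_neg (by rw [hp]; decide), if_neg (by rw [hk]; decide)]]
        rw [hstep, ih acc curr hc]
        simp

-- ===== VERDICT (by name: the statement is the Claim_ definition above) =====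
theorem tokenize_comment_spec : Claim_equal_tokenize_comment := by
  intro comment _
  unfold Spec_tokenize_comment tokenize_comment tokenize_comment_alt
  rw [pvEmit_filter_flatMap]
  simpa [PySem.Chars.split₀] using
    pv_main comment.toList [] [] (by intro x hx; cases hx)
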